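-- pv_equiv track=rewrite | github.com/Archihub-App/archihub-backend | app/utils/functions.py | _build_segment_page_boundaries
-- ===== SOURCE A (Python) =====
-- def _build_segment_page_boundaries(segments, char_limit):
--     if not segments:
--         return [(0, 0)]
--     if not char_limit or char_limit <= 0:
--         return [(0, len(segments))]
--
--     boundaries = []
--     start_index = 0
--     current_chars = 0
--
--     for index, segment in enumerate(segments):
--         segment_text = segment.get('text') or ''
--         segment_length = len(segment_text)
--
--         if index > start_index and current_chars + segment_length > char_limit:
--             boundaries.append((start_index, index))
--             start_index = index
--             current_chars = 0
--
--         current_chars += segment_length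
--
--     boundaries.append((start_index, len(segments)))
--     return boundaries
-- ===== SOURCE B (Python) =====
-- def _build_segment_page_boundaries(segments, char_limit):
--     # Alternative decomposition: page-by-page nested loops over a single iterator,
--     # instead of one flat accumulator with reset logic.
--     if not segments:
--         return [(0, 0)]
--     if char_limit <= 0:
--         return [(0, len(segments))]
--
--     pages = []
--     it = iter(segments)
--     seg = next(it, None)
--     start = 0
--     while seg is not None:
--         # open a page: its first segment is always included
--         current = len(seg.get('text') or '')
--         end = start + 1
--         seg = next(it, None)
--         while seg is not None:
--             length = len(seg.get('text') or '')
--             if current + length > char_limit: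
--                 break
--             current += length
--             end += 1
--             seg = next(it, None)
--         pages.append((start, end))
--         start = end
--     return pages
-- ===== Notes on version B (the rewrite author's own statement) =====
-- stated objective: alternative
-- what changed: Replaces A's single flat fold with a reset-on-overflow accumulator and an 'index > start_index' guard by a page-by-page nested loop over one iterator: each outer iteration opens a page that always takes its first segment, the inner loop extends it until the character budget would overflow; no index comparison remains.
import Mathlib
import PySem

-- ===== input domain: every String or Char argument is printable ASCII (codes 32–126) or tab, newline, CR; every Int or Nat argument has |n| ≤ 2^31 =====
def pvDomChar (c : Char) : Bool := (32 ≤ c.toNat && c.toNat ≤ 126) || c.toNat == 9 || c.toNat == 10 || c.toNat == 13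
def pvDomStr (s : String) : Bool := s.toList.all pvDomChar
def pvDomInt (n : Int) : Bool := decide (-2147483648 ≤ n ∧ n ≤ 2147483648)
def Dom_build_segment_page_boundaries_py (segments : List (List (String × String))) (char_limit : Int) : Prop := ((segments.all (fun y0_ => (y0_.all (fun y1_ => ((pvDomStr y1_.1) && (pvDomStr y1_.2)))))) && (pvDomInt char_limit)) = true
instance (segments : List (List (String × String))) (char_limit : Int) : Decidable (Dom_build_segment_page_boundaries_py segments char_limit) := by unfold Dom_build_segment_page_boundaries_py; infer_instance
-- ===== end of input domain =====

-- B replaces A's flat fold (accumulator reset + index>start guard) by page-by-page nested loops; same cost, different decomposition.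

-- ===== PORT A =====
-- len(segment.get('text') or ''): assoc-list first-match lookup, '' on a missing key ('' also when the value is '')
def segLen (seg : List (String × String)) : Int :=
  PySem.Str.len ((seg.lookup "text").getD "")

def build_segment_page_boundaries_py (segments : List (List (String × String))) (char_limit : Int) : List (Int × Int) :=
  if segments = [] then [(0, 0)]
  else if char_limit = 0 ∨ char_limit ≤ 0 then [(0, (segments.length : Int))]
  else
    let st := (PySem.List.enumerate segments 0).foldl
      (fun (st : List (Int × Int) × Int × Int) p =>
        let (boundaries, start_index, current_chars) := st
        let segment_length := segLen p.2
        if p.1 > start_index ∧ current_chars + segment_length > char_limit then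
          (boundaries ++ [(start_index, p.1)], p.1, segment_length)
        else
          (boundaries, start_index, current_chars + segment_length))
      ([], 0, 0)
    st.1 ++ [(st.2.1, (segments.length : Int))]

-- ===== PORT B =====
-- inner while loop: (seg?, it) is modelled by the list of remaining segments; returns (end, remaining)
def altInner (char_limit current : Int) (endIdx : Int) (rest : List (List (String × String))) :
    Int × List (List (String × String)) :=
  match rest with
  | [] => (endIdx, [])
  | seg :: it =>
    let length := segLen seg
    if current + length > char_limit then (endIdx, seg :: it)
    else altInner char_limit (current + length) (endIdx + 1) it

theorem altInner_len_le (cl c e : Int) (rest : List (List (String × String))) :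
    (altInner cl c e rest).2.length ≤ rest.length := by
  induction rest generalizing c e with
  | nil => simp [altInner]
  | cons seg it ih =>
    simp only [altInner]
    split
    · simp
    · exact le_trans (ih _ _) (by simp)

-- outer while loop: one recursive call per page
def altOuter (char_limit : Int) (start : Int) (rest : List (List (String × String))) :
    List (Int × Int) :=
  match rest with
  | [] => []
  | seg :: it =>
    let current := segLen seg
    let r := altInner char_limit current (start + 1) it
    (start, r.1) :: altOuter char_limit r.1 r.2
  termination_by rest.length
  decreasing_by
    exact Nat.lt_succ_of_le (altInner_len_le _ _ _ it)

def build_segment_page_boundaries_py_alt (segments : List (List (String × String))) (char_limit : Int) : List (Int × Int) :=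
  if segments = [] then [(0, 0)]
  else if char_limit ≤ 0 then [(0, (segments.length : Int))]
  else altOuter char_limit 0 segments

-- ===== PRECONDITION & SPEC =====
def Spec_build_segment_page_boundaries_py (segments : List (List (String × String))) (char_limit : Int) (out : List (Int × Int)) : Prop := out = build_segment_page_boundaries_py_alt segments char_limit
instance (segments : List (List (String × String))) (char_limit : Int) (out : List (Int × Int)) : Decidable (Spec_build_segment_page_boundaries_py segments char_limit out) := by unfold Spec_build_segment_page_boundaries_py; infer_instance

-- ===== CLAIM (what is proved, stated in full; the proofs are below) =====
def Claim_equal_build_segment_page_boundaries_py : Prop := ∀ (segments : List (List (String × String))) (char_limit : Int), Dom_build_segment_page_boundaries_py segments char_limit → Spec_build_segment_page_boundaries_py segments char_limit (build_segment_page_boundaries_py segments char_limit)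

-- ===== LEMMAS AND PROOFS =====

-- A's fold, written as structural recursion on the remaining list (idx = enumerate index)
def goA (cl : Int) (rest : List (List (String × String))) (idx : Int)
    (st : List (Int × Int) × Int × Int) : List (Int × Int) × Int × Int :=
  match rest with
  | [] => st
  | x :: xs =>
    let (B, s, c) := st
    let len := segLen x
    if idx > s ∧ c + len > cl then goA cl xs (idx + 1) (B ++ [(s, idx)], idx, len)
    else goA cl xs (idx + 1) (B, s, c + len)

theorem foldA_eq_goA (cl : Int) (rest : List (List (String × String))) (idx : Int)
    (st : List (Int × Int) × Int × Int) :
    (PySem.List.enumerate rest idx).foldl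
      (fun (st : List (Int × Int) × Int × Int) p =>
        let (boundaries, start_index, current_chars) := st
        let segment_length := segLen p.2
        if p.1 > start_index ∧ current_chars + segment_length > cl then
          (boundaries ++ [(start_index, p.1)], p.1, segment_length)
        else
          (boundaries, start_index, current_chars + segment_length)) st
    = goA cl rest idx st := by
  induction rest generalizing idx st with
  | nil => simp [PySem.List.enumerate_nil, goA]
  | cons x xs ih =>
    obtain ⟨B, s, c⟩ := st
    rw [PySem.List.enumerate_cons]
    simp only [List.foldl, goA]
    split <;> exact ih _ _

-- main simulation: A's remaining fold, completed with the final append, equals B's pages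
theorem goA_eq_pages (cl : Int) (rest : List (List (String × String))) (idx : Int)
    (B : List (Int × Int)) (s c : Int) (hs : s < idx) :
    (goA cl rest idx (B, s, c)).1 ++ [((goA cl rest idx (B, s, c)).2.1, idx + (rest.length : Int))]
    = B ++ (s, (altInner cl c idx rest).1)
        :: altOuter cl (altInner cl c idx rest).1 (altInner cl c idx rest).2 := by
  induction rest generalizing idx B s c with
  | nil => simp [goA, altInner, altOuter]
  | cons x xs ih =>
    simp only [goA, altInner]
    by_cases hb : c + segLen x > cl
    · have hcond : idx > s ∧ c + segLen x > cl := ⟨hs, hb⟩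
      rw [if_pos hcond, if_pos hb]
      have := ih (idx + 1) (B ++ [(s, idx)]) idx (segLen x) (by omega)
      rw [altOuter]
      simp only []
      have harith : idx + ((x :: xs).length : Int) = (idx + 1) + (xs.length : Int) := by
        push_cast [List.length_cons]; ring
      rw [harith, this]
      simp
    · rw [if_neg (by tauto), if_neg hb]
      have harith : idx + ((x :: xs).length : Int) = (idx + 1) + (xs.length : Int) := by
        push_cast [List.length_cons]; ring
      rw [harith]
      exact ih (idx + 1) B s (c + segLen x) (by omega)

-- ===== VERDICT (by name: the statement is the Claim_ definition above) =====
theorem build_segment_page_boundaries_py_spec : Claim_equal_build_segment_page_boundaries_py := by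
  intro segments char_limit _
  unfold Spec_build_segment_page_boundaries_py
  unfold build_segment_page_boundaries_py build_segment_page_boundaries_py_alt
  by_cases h0 : segments = []
  · simp [h0]
  · rw [if_neg h0, if_neg h0]
    by_cases hcl : char_limit ≤ 0
    · rw [if_pos (Or.inr hcl), if_pos hcl]
    · rw [if_neg (by omega : ¬(char_limit = 0 ∨ char_limit ≤ 0)), if_neg hcl]
      obtain ⟨x, xs, rfl⟩ := List.exists_cons_of_ne_nil h0
      simp only [foldA_eq_goA]
      rw [goA]
      rw [if_neg (by omega : ¬((0 : Int) > 0 ∧ (0 : Int) + segLen x > char_limit))]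
      have h1 := goA_eq_pages char_limit xs 1 [] 0 (segLen x) (by omega)
      rw [altOuter]
      have harith : ((x :: xs).length : Int) = 1 + (xs.length : Int) := by push_cast [List.length_cons]; ring
      rw [harith]
      simpa using h1
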